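-- pv_equiv track=rewrite | github.com/xiaosongshine/MNT_RNN_Keras | mian.py | get_eng_dicts
-- ===== SOURCE A (Python) =====
-- def get_eng_dicts(datas):
--     w_all_dict = {}
--     for sample in datas:
--         for token in sample.split(" "):
--             if token not in w_all_dict.keys():
--                 w_all_dict[token] = 1
--             else:
--                 w_all_dict[token] += 1
--
--     sort_w_list = sorted(w_all_dict.items(),  key=lambda d: d[1], reverse=True)
--
--
--     w_keys = [x for x,_ in sort_w_list[:7000-2]]
--     w_keys.insert(0,"<PAD>")
--     w_keys.insert(0,"<UNK>")
--
--
--     w_dict = { x:i for i,x in enumerate(w_keys) }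
--     i_dict = { i:x for i,x in enumerate(w_keys) }
--     return w_dict,i_dict
-- ===== SOURCE B (Python) =====
-- def get_eng_dicts(datas):
--     counts = {}
--     for sample in datas:
--         for token in sample.split(" "):
--             counts[token] = counts.get(token, 0) + 1
--
--     # bucket tokens by frequency (insertion order preserved inside a bucket),
--     # then emit buckets by descending frequency: equals a stable reverse sort.
--     buckets = {}
--     for token, c in counts.items():
--         buckets.setdefault(c, []).append(token)
--
--     w_keys = ["<UNK>", "<PAD>"]
--     for c in sorted(buckets, reverse=True):
--         w_keys.extend(buckets[c])
--     w_keys = w_keys[:7000]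
--
--     w_dict = {}
--     i_dict = {}
--     for i, x in enumerate(w_keys):
--         w_dict[x] = i
--         i_dict[i] = x
--     return w_dict, i_dict
-- ===== Notes on version B (the rewrite author's own statement) =====
-- stated objective: alternative
-- what changed: Instead of stably sorting all (token, count) items in descending count order, B groups tokens into per-frequency buckets (insertion order kept inside a bucket) and emits the buckets along the sorted distinct counts, which yields the identical top-6998 list with identical tie ordering.
import Mathlib
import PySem

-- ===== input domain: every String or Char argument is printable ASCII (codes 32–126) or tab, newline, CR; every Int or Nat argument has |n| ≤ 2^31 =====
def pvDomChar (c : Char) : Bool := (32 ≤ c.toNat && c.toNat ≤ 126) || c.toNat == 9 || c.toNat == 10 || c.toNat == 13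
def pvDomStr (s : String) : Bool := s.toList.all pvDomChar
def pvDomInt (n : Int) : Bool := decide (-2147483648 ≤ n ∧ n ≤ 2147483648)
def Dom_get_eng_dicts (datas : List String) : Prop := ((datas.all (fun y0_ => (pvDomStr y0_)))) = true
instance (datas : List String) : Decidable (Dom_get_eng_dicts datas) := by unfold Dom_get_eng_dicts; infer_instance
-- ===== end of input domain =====

-- B replaces A's full stable descending sort of the (token, count) items by grouping the
-- tokens into frequency buckets and emitting the buckets by descending distinct count
-- (objective: alternative selection strategy, identical output).

-- ===== PORT A =====
def get_eng_dicts (datas : List String) : (List (String × Int)) × (List (Int × String)) :=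
  -- Str.split? is exact here: it is none only for an empty separator, and the separator is the literal " "
  let w_all_dict : PySem.Dict String Int :=
    datas.foldl (fun d sample =>
      ((PySem.Str.split? sample " ").getD []).foldl (fun d token =>
        if d.contains token = false then d.insert token 1
        else d.insert token (d.getD token 0 + 1)) d) PySem.Dict.empty
  let sort_w_list := PySem.List.sorted w_all_dict.items (fun p => p.2) true
  let w_keys := (PySem.List.slice sort_w_list none (some (7000 - 2))).map (fun p => p.1)
  let w_keys := "<PAD>" :: w_keys
  let w_keys := "<UNK>" :: w_keys
  let w_dict := (PySem.List.enumerate w_keys).foldl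
      (fun d p => d.insert p.2 p.1) (PySem.Dict.empty : PySem.Dict String Int)
  let i_dict := (PySem.List.enumerate w_keys).foldl
      (fun d p => d.insert p.1 p.2) (PySem.Dict.empty : PySem.Dict Int String)
  (w_dict.items, i_dict.items)

-- ===== PORT B =====
def get_eng_dicts_alt (datas : List String) : (List (String × Int)) × (List (Int × String)) :=
  let counts : PySem.Dict String Int :=
    datas.foldl (fun d sample =>
      ((PySem.Str.split? sample " ").getD []).foldl (fun d token =>
        d.insert token (d.getD token 0 + 1)) d) PySem.Dict.empty
  -- buckets.setdefault(c, []).append(token): overwrite in place with the extended bucket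
  let buckets : PySem.Dict Int (List String) :=
    counts.items.foldl (fun b p => b.insert p.2 (b.getD p.2 [] ++ [p.1])) PySem.Dict.empty
  let w_keys := (PySem.List.sorted buckets.keys id true).foldl
      (fun acc c => acc ++ buckets.getD c []) ["<UNK>", "<PAD>"]
  let w_keys := PySem.List.slice w_keys none (some 7000)
  let dicts := (PySem.List.enumerate w_keys).foldl
      (fun (pr : PySem.Dict String Int × PySem.Dict Int String) p =>
        (pr.1.insert p.2 p.1, pr.2.insert p.1 p.2))
      (PySem.Dict.empty, PySem.Dict.empty)
  (dicts.1.items, dicts.2.items)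

-- ===== PRECONDITION & SPEC =====
def Spec_get_eng_dicts (datas : List String) (out : (List (String × Int)) × (List (Int × String))) : Prop := out = get_eng_dicts_alt datas
instance (datas : List String) (out : (List (String × Int)) × (List (Int × String))) : Decidable (Spec_get_eng_dicts datas out) := by unfold Spec_get_eng_dicts; infer_instance

-- ===== CLAIM (what is proved, stated in full; the proofs are below) =====
def Claim_equal_get_eng_dicts : Prop := ∀ (datas : List String), Dom_get_eng_dicts datas → Spec_get_eng_dicts datas (get_eng_dicts datas)

-- ===== LEMMAS AND PROOFS =====

-- A's membership-tested counting step equals B's get-with-default counting step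
lemma pv_count_step_eq :
    (fun (d : PySem.Dict String Int) token =>
      if d.contains token = false then d.insert token 1
      else d.insert token (d.getD token 0 + 1)) =
    (fun (d : PySem.Dict String Int) token => d.insert token (d.getD token 0 + 1)) := by
  funext d token
  by_cases h : d.contains token = false
  · simp [h, PySem.Dict.getD_of_not_contains d 0 h]
  · simp [h]

-- insertBy lands exactly between a kept prefix and a pushed-down suffix
lemma pv_insertBy_split {α : Type} (before : α → α → Bool) (x : α) :
    ∀ (as bs : List α), (∀ a ∈ as, before x a = false) → (∀ b ∈ bs, before x b = true) →
    PySem.List.insertBy before x (as ++ bs) = as ++ x :: bs := by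
  intro as
  induction as with
  | nil =>
    intro bs _ hbs
    cases bs with
    | nil => simp [PySem.List.insertBy]
    | cons b bs => simp [PySem.List.insertBy, hbs b (by simp)]
  | cons a as ih =>
    intro bs has hbs
    simp [PySem.List.insertBy, has a (by simp),
      ih bs (fun a ha => has a (by simp [ha])) hbs]

-- stability: the stable descending sort by key is the concatenation of the key buckets
-- taken along any strictly descending key list covering the list
lemma pv_sorted_rev_eq_flatMap (ds : List Int) :
    ∀ (l : List (String × Int)), List.Pairwise (fun a b => b < a) ds →
    (∀ p ∈ l, p.2 ∈ ds) →
    PySem.List.sorted l (fun p => p.2) true =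
      ds.flatMap (fun c => l.filter (fun p => p.2 == c)) := by
  intro l
  induction l using List.reverseRecOn with
  | nil => intro _ _; simp [PySem.List.sorted]
  | append_singleton l x ih =>
    intro hds hmem
    have hx : x.2 ∈ ds := hmem x (by simp)
    obtain ⟨ds₁, ds₂, rfl⟩ := List.append_of_mem hx
    rw [List.pairwise_append] at hds
    obtain ⟨h₁, h₂, h₁₂⟩ := hds
    have hlt₂ : ∀ c ∈ ds₂, c < x.2 := (List.pairwise_cons.mp h₂).1
    have hgt₁ : ∀ c ∈ ds₁, x.2 < c := fun c hc => h₁₂ c hc x.2 (by simp)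
    have hih := ih (List.pairwise_append.mpr ⟨h₁, h₂, h₁₂⟩)
      (fun p hp => hmem p (by simp [hp]))
    rw [PySem.List.sorted_rev_eq_foldl_insertBy, List.foldl_append,
      ← PySem.List.sorted_rev_eq_foldl_insertBy, hih]
    simp only [List.foldl_cons, List.foldl_nil]
    rw [List.flatMap_append, List.flatMap_cons, List.flatMap_append, List.flatMap_cons]
    have e₁ : ds₁.flatMap (fun c => (l ++ [x]).filter (fun p => p.2 == c)) =
        ds₁.flatMap (fun c => l.filter (fun p => p.2 == c)) := by
      apply List.flatMap_congr
      intro c hc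
      rw [List.filter_append]
      have hb : (x.2 == c) = false := by simpa using ne_of_lt (hgt₁ c hc)
      simp [List.filter, hb]
    have e₂ : ds₂.flatMap (fun c => (l ++ [x]).filter (fun p => p.2 == c)) =
        ds₂.flatMap (fun c => l.filter (fun p => p.2 == c)) := by
      apply List.flatMap_congr
      intro c hc
      rw [List.filter_append]
      have hb : (x.2 == c) = false := by simpa using ne_of_gt (hlt₂ c hc)
      simp [List.filter, hb]
    have e₀ : (l ++ [x]).filter (fun p => p.2 == x.2) =
        l.filter (fun p => p.2 == x.2) ++ [x] := by
      rw [List.filter_append]; simp [List.filter]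
    rw [e₁, e₂, e₀]
    rw [show ds₁.flatMap (fun c => l.filter (fun p => p.2 == c)) ++
          (l.filter (fun p => p.2 == x.2) ++ ds₂.flatMap (fun c => l.filter (fun p => p.2 == c))) =
        (ds₁.flatMap (fun c => l.filter (fun p => p.2 == c)) ++ l.filter (fun p => p.2 == x.2)) ++
          ds₂.flatMap (fun c => l.filter (fun p => p.2 == c)) from by simp]
    rw [pv_insertBy_split]
    · simp
    · intro a ha
      simp only [List.mem_append, List.mem_flatMap, List.mem_filter] at ha
      rcases ha with ⟨c, hc, _, ha2⟩ | ⟨_, ha2⟩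
      · have : a.2 = c := by simpa using ha2
        simp [this, not_lt.mpr (le_of_lt (hgt₁ c hc))]
      · have : a.2 = x.2 := by simpa using ha2
        simp [this]
    · intro b hb
      simp only [List.mem_flatMap, List.mem_filter] at hb
      obtain ⟨c, hc, _, hb2⟩ := hb
      have : b.2 = c := by simpa using hb2
      simp [this, hlt₂ c hc]

-- the bucket dict's entry at c collects, in order, the first components of the pairs with count c
lemma pv_buckets_getD :
    ∀ (l : List (String × Int)) (b : PySem.Dict Int (List String)) (c : Int),
    (l.foldl (fun b p => b.insert p.2 (b.getD p.2 [] ++ [p.1])) b).getD c [] =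
      b.getD c [] ++ (l.filter (fun p => p.2 == c)).map Prod.fst := by
  intro l
  induction l with
  | nil => intro b c; simp
  | cons p l ih =>
    intro b c
    simp only [List.foldl_cons, ih, List.filter_cons]
    by_cases h : p.2 = c
    · have hb : (p.2 == c) = true := by simpa using h
      simp [hb, h]
    · have hb : (p.2 == c) = false := by simpa using h
      have h' : c ≠ p.2 := fun e => h e.symm
      simp [hb, PySem.Dict.getD_insert, h']

lemma pv_buckets_contains_mono :
    ∀ (l : List (String × Int)) (b : PySem.Dict Int (List String)) (c : Int),
    b.contains c = true →
    (l.foldl (fun b p => b.insert p.2 (b.getD p.2 [] ++ [p.1])) b).contains c = true := by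
  intro l
  induction l with
  | nil => intro b c h; simpa using h
  | cons p l ih =>
    intro b c h
    simp only [List.foldl_cons]
    exact ih _ c (by simp [PySem.Dict.contains_insert, h])

lemma pv_buckets_contains :
    ∀ (l : List (String × Int)) (b : PySem.Dict Int (List String)) (p : String × Int),
    p ∈ l →
    (l.foldl (fun b p => b.insert p.2 (b.getD p.2 [] ++ [p.1])) b).contains p.2 = true := by
  intro l
  induction l with
  | nil => intro b p h; simp at h
  | cons q l ih =>
    intro b p hp
    simp only [List.foldl_cons]
    rcases List.mem_cons.mp hp with rfl | hp
    · exact pv_buckets_contains_mono l _ p.2 (PySem.Dict.contains_insert_self _ _ _)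
    · exact ih _ p hp

lemma pv_buckets_nodup :
    ∀ (l : List (String × Int)) (b : PySem.Dict Int (List String)),
    b.keys.Nodup →
    (l.foldl (fun b p => b.insert p.2 (b.getD p.2 [] ++ [p.1])) b).keys.Nodup := by
  intro l
  induction l with
  | nil => intro b h; simpa using h
  | cons p l ih =>
    intro b h
    exact ih _ (PySem.Dict.nodup_keys_insert _ _ _ h)

-- ===== VERDICT (by name: the statement is the Claim_ definition above) =====
theorem get_eng_dicts_spec : Claim_equal_get_eng_dicts := by
  intro datas _
  unfold Spec_get_eng_dicts
  simp only [get_eng_dicts, get_eng_dicts_alt]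
  rw [pv_count_step_eq]
  set counts : PySem.Dict String Int :=
    datas.foldl (fun d sample =>
      ((PySem.Str.split? sample " ").getD []).foldl (fun d token =>
        d.insert token (d.getD token 0 + 1)) d) PySem.Dict.empty with hcounts
  set l := counts.items with hl
  set buckets : PySem.Dict Int (List String) :=
    l.foldl (fun b p => b.insert p.2 (b.getD p.2 [] ++ [p.1])) PySem.Dict.empty with hbuckets
  set ds := PySem.List.sorted buckets.keys id true with hds
  have hnd : ds.Nodup :=
    ((PySem.List.sorted_perm buckets.keys id true).nodup_iff).mpr
      (pv_buckets_nodup l _ PySem.Dict.nodup_keys_empty)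
  have hpair : List.Pairwise (fun a b => b < a) ds := by
    have hle := PySem.List.sorted_pairwise_rev buckets.keys id
    rw [← hds] at hle
    exact (hle.and hnd).imp (fun h => lt_of_le_of_ne h.1 (Ne.symm h.2))
  have hcover : ∀ p ∈ l, p.2 ∈ ds := by
    intro p hp
    have := pv_buckets_contains l PySem.Dict.empty p hp
    rw [← hbuckets] at this
    exact ((PySem.List.sorted_perm buckets.keys id true).mem_iff).mpr
      ((PySem.Dict.contains_iff_mem_keys _ _).mp this)
  have hsort := pv_sorted_rev_eq_flatMap ds l hpair hcover
  have hflat : (PySem.List.sorted buckets.keys id true).foldl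
      (fun acc c => acc ++ buckets.getD c []) ["<UNK>", "<PAD>"] =
      ["<UNK>", "<PAD>"] ++ (ds.flatMap (fun c => l.filter (fun p => p.2 == c))).map Prod.fst := by
    rw [← hds, PySem.List.foldl_append_eq_flatMap]
    congr 1
    rw [List.map_flatMap]
    apply List.flatMap_congr
    intro c _
    rw [hbuckets, pv_buckets_getD]
    simp
  have htake : ∀ (T : List String),
      ("<UNK>" :: "<PAD>" :: T).take 7000 = "<UNK>" :: "<PAD>" :: T.take 6998 := by
    intro T
    rw [show (7000 : Nat) = 6998 + 1 + 1 from rfl, List.take_succ_cons, List.take_succ_cons]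
  rw [hsort, hflat,
    PySem.List.slice_to _ (by norm_num : (0:Int) ≤ 7000 - 2),
    PySem.List.slice_to _ (by norm_num : (0:Int) ≤ 7000),
    PySem.List.foldl_prod_mk
      (fun (d : PySem.Dict String Int) (p : Int × String) => d.insert p.2 p.1)
      (fun (d : PySem.Dict Int String) (p : Int × String) => d.insert p.1 p.2)]
  rw [show ((7000:Int) - 2).toNat = 6998 from rfl, show ((7000:Int)).toNat = 7000 from rfl,
    List.cons_append, List.cons_append, List.nil_append, htake, List.map_take]
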